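-- pv_equiv track=rewrite | github.com/swarnaHub/ExplaGraphs | metrics/utils_seqa.py | create_leave_one_out_graphs
-- ===== SOURCE A (Python) =====
-- def create_leave_one_out_graphs(graph):
--     leave_one_out_graphs = []
--     edges = graph[1:-1].split(")(")
--     for edge in edges:
--         leave_one_out_graph = graph.replace("(" + edge + ")", "")
--         leave_one_out_graph = leave_one_out_graph.replace("(", "").replace(";", "").replace(")", ". ")
--         leave_one_out_graphs.append(leave_one_out_graph)
--
--     return leave_one_out_graphs
-- ===== SOURCE B (Python) =====
-- def create_leave_one_out_graphs(graph):
--     leave_one_out_graphs = []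
--     for edge in graph[1:-1].split(")("):
--         tok = "(" + edge + ")"
--         buf = []
--         i = 0
--         n = len(graph)
--         while i < n:
--             if graph.startswith(tok, i):
--                 i += len(tok)
--             else:
--                 c = graph[i]
--                 if c == ")":
--                     buf.append(". ")
--                 elif c != "(" and c != ";":
--                     buf.append(c)
--                 i += 1
--         leave_one_out_graphs.append("".join(buf))
--     return leave_one_out_graphs
-- ===== Notes on version B (the rewrite author's own statement) =====
-- stated objective: alternative
-- what changed: Per edge, A runs four sequential whole-string replace passes (token deletion, then three character substitutions, building three intermediate strings); B instead makes one left-to-right cursor scan of the original string that skips leftmost token matches via startswith and emits the translated characters on the fly, with no intermediate strings.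
import Mathlib
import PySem

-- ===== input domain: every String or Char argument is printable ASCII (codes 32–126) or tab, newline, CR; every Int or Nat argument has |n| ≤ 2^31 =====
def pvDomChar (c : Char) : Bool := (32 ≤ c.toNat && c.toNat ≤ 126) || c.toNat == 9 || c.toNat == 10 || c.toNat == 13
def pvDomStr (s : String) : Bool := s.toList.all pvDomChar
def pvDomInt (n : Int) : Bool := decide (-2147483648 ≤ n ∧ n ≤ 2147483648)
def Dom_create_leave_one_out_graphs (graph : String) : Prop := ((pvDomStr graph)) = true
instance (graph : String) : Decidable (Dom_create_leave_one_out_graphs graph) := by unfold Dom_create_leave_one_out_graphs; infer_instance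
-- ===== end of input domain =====

-- B fuses A's four per-edge replace passes into a single cursor scan of the original string
-- (skip leftmost token matches, translate the remaining characters on the fly); objective: alternative.

-- ===== PORT A =====
def create_leave_one_out_graphs (graph : String) : List String :=
  let g := graph.toList
  let edges := PySem.Chars.splitOn (PySem.List.slice g (some 1) (some (-1))) [')', '(']
  edges.foldl (fun acc edge =>
    let t1 := PySem.Chars.replace g ('(' :: edge ++ [')']) []
    let t2 := PySem.Chars.replace (PySem.Chars.replace (PySem.Chars.replace t1 ['('] []) [';'] []) [')'] ['.', ' ']
    acc ++ [String.ofList t2]) []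

-- ===== PORT B =====
-- the body of Source B's inner `while` on one character: what gets appended to buf for char c
-- (Source B appends the piece ". " / the char / nothing; pieces are concatenated as produced)
def pvCharMap (c : Char) : List Char :=
  if c = ')' then ['.', ' '] else if c ≠ '(' ∧ c ≠ ';' then [c] else []

-- Source B's inner while loop: cursor scan over the remaining suffix of graph; on a token match
-- the cursor jumps len(tok) = edge.length + 2 characters, else one translated char is emitted
def pvScan (edge : List Char) : List Char → List Char
  | [] => []
  | c :: t =>
    if ('(' :: edge ++ [')']).isPrefixOf (c :: t) then pvScan edge (t.drop (edge.length + 1))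
    else pvCharMap c ++ pvScan edge t
  termination_by l => l.length
  decreasing_by
  · simp only [List.length_drop, List.length_cons]; omega
  · simp

def create_leave_one_out_graphs_alt (graph : String) : List String :=
  let g := graph.toList
  let edges := PySem.Chars.splitOn (PySem.List.slice g (some 1) (some (-1))) [')', '(']
  edges.foldl (fun acc edge => acc ++ [String.ofList (pvScan edge g)]) []

-- ===== PRECONDITION & SPEC =====
def Spec_create_leave_one_out_graphs (graph : String) (out : List String) : Prop := out = create_leave_one_out_graphs_alt graph
instance (graph : String) (out : List String) : Decidable (Spec_create_leave_one_out_graphs graph out) := by unfold Spec_create_leave_one_out_graphs; infer_instance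

-- ===== CLAIM (what is proved, stated in full; the proofs are below) =====
def Claim_equal_create_leave_one_out_graphs : Prop := ∀ (graph : String), Dom_create_leave_one_out_graphs graph → Spec_create_leave_one_out_graphs graph (create_leave_one_out_graphs graph)

-- ===== LEMMAS AND PROOFS =====

-- replace.go with new = [] pulls its accumulator out front
lemma repl_go_acc (old : List Char) : ∀ (fuel : Nat) (l acc : List Char),
    PySem.Chars.replace.go old [] fuel l acc = acc.reverse ++ PySem.Chars.replace.go old [] fuel l [] := by
  intro fuel
  induction fuel with
  | zero => intro l acc; simp [PySem.Chars.replace.go]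
  | succ f ih =>
    intro l acc
    cases l with
    | nil => simp [PySem.Chars.replace.go]
    | cons c t =>
      simp only [PySem.Chars.replace.go, List.reverse_nil, List.nil_append]
      split
      · rw [ih (List.drop old.length (c :: t)) acc]
      · rw [ih t (c :: acc), ih t [c]]
        simp

-- replace.go with nonempty old ignores extra fuel
lemma repl_go_fuel_aux (old : List Char) (h : old ≠ []) : ∀ (n : Nat) (l : List Char), l.length ≤ n →
    ∀ (f₁ f₂ : Nat) (acc : List Char), l.length ≤ f₁ → l.length ≤ f₂ →
    PySem.Chars.replace.go old [] f₁ l acc = PySem.Chars.replace.go old [] f₂ l acc := by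
  intro n
  induction n with
  | zero =>
    intro l hl f₁ f₂ acc _ _
    have : l = [] := List.eq_nil_of_length_eq_zero (Nat.le_zero.mp hl)
    subst this
    cases f₁ <;> cases f₂ <;> simp [PySem.Chars.replace.go]
  | succ n ih =>
    intro l hl f₁ f₂ acc h1 h2
    cases l with
    | nil => cases f₁ <;> cases f₂ <;> simp [PySem.Chars.replace.go]
    | cons c t =>
      have hol : 1 ≤ old.length := by
        cases old with
        | nil => exact absurd rfl h
        | cons _ _ => simp
      simp at h1 h2 hl
      obtain ⟨g₁, rfl⟩ : ∃ g, f₁ = g + 1 := ⟨f₁ - 1, by omega⟩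
      obtain ⟨g₂, rfl⟩ : ∃ g, f₂ = g + 1 := ⟨f₂ - 1, by omega⟩
      simp only [PySem.Chars.replace.go]
      split
      · exact ih _ (by simp; omega) _ _ _ (by simp; omega) (by simp; omega)
      · exact ih t (by omega) _ _ _ (by omega) (by omega)

-- single-char replace is a flatMap
lemma replace_single_aux (o : Char) (new : List Char) : ∀ (l acc : List Char),
    PySem.Chars.replace.go [o] new l.length l acc
      = acc.reverse ++ l.flatMap (fun c => if c = o then new else [c]) := by
  intro l
  induction l with
  | nil => intro acc; simp [PySem.Chars.replace.go]
  | cons c t ih =>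
    intro acc
    simp only [List.length_cons, PySem.Chars.replace.go]
    split
    · rename_i hp
      have hc : c = o := by
        have h' := hp
        simp [List.isPrefixOf] at h'
        exact h'.symm
      simp only [List.length_nil, Nat.zero_add, List.drop_succ_cons, List.drop_zero] at *
      rw [ih]
      simp [hc]
    · rename_i hp
      have hc : ¬ c = o := fun h => hp (by simp [List.isPrefixOf, h])
      rw [ih]
      simp [hc]

lemma replace_single (o : Char) (new : List Char) (s : List Char) :
    PySem.Chars.replace s [o] new = s.flatMap (fun c => if c = o then new else [c]) := by
  simpa [PySem.Chars.replace] using replace_single_aux o new s []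

-- the three chained replaces of A equal one flatMap of pvCharMap
lemma chain_eq_flatMap (s : List Char) :
    PySem.Chars.replace (PySem.Chars.replace (PySem.Chars.replace s ['('] []) [';'] []) [')'] ['.', ' ']
      = s.flatMap pvCharMap := by
  rw [replace_single, replace_single, replace_single]
  induction s with
  | nil => simp
  | cons c t ih =>
    simp only [List.flatMap_cons, List.flatMap_append, ih]
    congr 1
    by_cases h1 : c = '(' <;> by_cases h2 : c = ';' <;> by_cases h3 : c = ')' <;>
      simp [pvCharMap, h1, h2, h3]

-- B's cursor scan computes the flatMap of pvCharMap over A's token-deleted string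
lemma scan_eq_aux (edge : List Char) : ∀ (n : Nat) (l : List Char), l.length ≤ n →
    pvScan edge l = (PySem.Chars.replace.go ('(' :: edge ++ [')']) [] l.length l []).flatMap pvCharMap := by
  intro n
  induction n with
  | zero =>
    intro l hl
    have : l = [] := List.eq_nil_of_length_eq_zero (Nat.le_zero.mp hl)
    subst this
    simp [pvScan, PySem.Chars.replace.go]
  | succ n ih =>
    intro l hl
    cases l with
    | nil => simp [pvScan, PySem.Chars.replace.go]
    | cons c t =>
      rw [pvScan]
      simp only [List.length_cons, PySem.Chars.replace.go, List.reverse_nil, List.nil_append]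
      split
      · -- token match: both jump over the token
        have hd : List.drop ('(' :: edge ++ [')']).length (c :: t) = t.drop (edge.length + 1) := by
          simp
        rw [hd]
        have hlen : (t.drop (edge.length + 1)).length ≤ t.length := by
          simp only [List.length_drop]; omega
        rw [repl_go_fuel_aux ('(' :: edge ++ [')']) (by simp) t.length (t.drop (edge.length + 1))
              hlen t.length (t.drop (edge.length + 1)).length [] hlen (le_refl _)]
        exact ih _ (by simp only [List.length_drop] at ⊢; simp only [List.length_cons] at hl; omega)
      · -- no match: emit the translated char, advance by one
        rw [repl_go_acc ('(' :: edge ++ [')']) t.length t [c]]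
        simp only [List.reverse_cons, List.reverse_nil, List.nil_append, List.singleton_append,
          List.flatMap_cons]
        rw [ih t (by simp at hl; omega)]

lemma scan_eq (edge g : List Char) :
    pvScan edge g = (PySem.Chars.replace g ('(' :: edge ++ [')']) []).flatMap pvCharMap := by
  have h : PySem.Chars.replace g ('(' :: edge ++ [')']) []
      = PySem.Chars.replace.go ('(' :: edge ++ [')']) [] g.length g [] := by
    unfold PySem.Chars.replace; rfl
  rw [h]
  exact scan_eq_aux edge g.length g (le_refl _)

-- both ports' append-folds are maps
lemma foldl_push_eq_map {α β : Type} (f : α → β) : ∀ (l : List α) (acc : List β),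
    l.foldl (fun acc e => acc ++ [f e]) acc = acc ++ l.map f := by
  intro l
  induction l with
  | nil => simp
  | cons x xs ih => intro acc; simp [List.foldl, ih]

-- ===== VERDICT (by name: the statement is the Claim_ definition above) =====
theorem create_leave_one_out_graphs_spec : Claim_equal_create_leave_one_out_graphs := by
  intro graph _
  unfold Spec_create_leave_one_out_graphs create_leave_one_out_graphs create_leave_one_out_graphs_alt
  simp only [foldl_push_eq_map, List.nil_append]
  refine List.map_congr_left (fun edge _ => ?_)
  rw [scan_eq, chain_eq_flatMap]
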